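-- pv_equiv track=rewrite | github.com/dortkthf/BOJ | 프로그래머스/lv1/42862. 체육복/체육복.py | solution
-- ===== SOURCE A (Python) =====
-- def solution(n, lost, reserve):
--     answer = 0
--     nlost = list(set(lost[:])-set(reserve[:]))
--     nreserve = set(reserve[:])-set(lost[:])
--     lost = nlost[:]
--     lost.sort()
--     for i in lost:
--         if i-1 in nreserve:
--             nreserve.remove(i-1)
--             nlost.remove(i)
--         elif i+1 in nreserve:
--             nreserve.remove(i+1)
--             nlost.remove(i)
--     return n-len(nlost)
-- ===== SOURCE B (Python) =====
-- def solution(n, lost, reserve):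
--     l = sorted(set(lost) - set(reserve))
--     r = sorted(set(reserve) - set(lost))
--     j = 0
--     matched = 0
--     for i in l:
--         while j < len(r) and r[j] < i - 1:
--             j += 1
--         if j < len(r) and r[j] <= i + 1:
--             matched += 1
--             j += 1
--     return n - (len(l) - matched)
-- ===== Notes on version B (the rewrite author's own statement) =====
-- stated objective: faster
-- what changed: Replaces A's greedy that mutates a reserve set and repeatedly calls list.remove on the shrinking lost list with a single two-pointer merge over the two sorted deduplicated lists that only counts matches.
import Mathlib
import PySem

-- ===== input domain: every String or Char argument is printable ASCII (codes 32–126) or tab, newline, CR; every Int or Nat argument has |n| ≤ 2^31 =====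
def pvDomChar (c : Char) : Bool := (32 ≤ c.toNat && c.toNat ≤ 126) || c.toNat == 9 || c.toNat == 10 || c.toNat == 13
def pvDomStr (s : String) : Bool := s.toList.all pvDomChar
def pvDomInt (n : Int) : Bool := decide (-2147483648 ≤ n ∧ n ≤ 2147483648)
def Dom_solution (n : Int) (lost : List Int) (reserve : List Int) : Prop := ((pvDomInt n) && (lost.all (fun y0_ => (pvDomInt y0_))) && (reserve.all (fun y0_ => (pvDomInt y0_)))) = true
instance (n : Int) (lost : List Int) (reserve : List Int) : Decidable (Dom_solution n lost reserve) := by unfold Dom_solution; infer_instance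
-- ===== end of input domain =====

-- B replaces A's greedy that deletes from a mutable reserve set and calls list.remove on the
-- shrinking lost list with a two-pointer merge over the two sorted deduplicated lists that only counts matches.

-- ===== PORT A =====
-- loop body of A's 'for i in lost': state = (nreserve, nlost); both remove calls are guarded
-- (set membership test / i ∈ nlost always holds), so Python never raises and getD is exact here
def stepA (st : PySem.Set Int × List Int) (i : Int) : PySem.Set Int × List Int :=
  if PySem.Set.contains st.1 (i - 1) then
    ((PySem.Set.remove? st.1 (i - 1)).getD st.1, (PySem.List.remove? st.2 i).getD st.2)
  else if PySem.Set.contains st.1 (i + 1) then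
    ((PySem.Set.remove? st.1 (i + 1)).getD st.1, (PySem.List.remove? st.2 i).getD st.2)
  else st

def solution (n : Int) (lost : List Int) (reserve : List Int) : Int :=
  let nlost : List Int := PySem.Set.diff (PySem.Set.ofList lost) (PySem.Set.ofList reserve)
  let nreserve : PySem.Set Int := PySem.Set.diff (PySem.Set.ofList reserve) (PySem.Set.ofList lost)
  let lost2 : List Int := PySem.List.sorted nlost (fun x => x) false
  let st := lost2.foldl stepA (nreserve, nlost)
  n - PySem.List.len st.2

-- ===== PORT B =====
-- the 'while j < len(r) and r[j] < i - 1: j += 1' loop of Source B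
def skipAhead (r : List Int) (i : Int) (j : Nat) : Nat :=
  if h : j < r.length then
    if r[j] < i - 1 then skipAhead r i (j + 1) else j
  else j
termination_by r.length - j
decreasing_by omega

-- loop body of Source B's 'for i in l': state = (j, matched)
def stepB (r : List Int) (st : Nat × Int) (i : Int) : Nat × Int :=
  let j := skipAhead r i st.1
  if h : j < r.length then
    if r[j] ≤ i + 1 then (j + 1, st.2 + 1) else (j, st.2)
  else (j, st.2)

def solution_alt (n : Int) (lost : List Int) (reserve : List Int) : Int :=
  let l : List Int := PySem.List.sorted (PySem.Set.diff (PySem.Set.ofList lost) (PySem.Set.ofList reserve)) (fun x => x) false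
  let r : List Int := PySem.List.sorted (PySem.Set.diff (PySem.Set.ofList reserve) (PySem.Set.ofList lost)) (fun x => x) false
  let st := l.foldl (stepB r) (0, 0)
  n - (PySem.List.len l - st.2)

-- ===== PRECONDITION & SPEC =====
def Spec_solution (n : Int) (lost : List Int) (reserve : List Int) (out : Int) : Prop := out = solution_alt n lost reserve
instance (n : Int) (lost : List Int) (reserve : List Int) (out : Int) : Decidable (Spec_solution n lost reserve out) := by unfold Spec_solution; infer_instance

-- ===== CLAIM (what is proved, stated in full; the proofs are below) =====
def Claim_equal_solution : Prop := ∀ (n : Int) (lost : List Int) (reserve : List Int), Dom_solution n lost reserve → Spec_solution n lost reserve (solution n lost reserve)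

-- ===== LEMMAS AND PROOFS =====

lemma skipAhead_le (r : List Int) (i : Int) (j : Nat) (hj : j ≤ r.length) :
    j ≤ skipAhead r i j ∧ skipAhead r i j ≤ r.length := by
  fun_induction skipAhead r i j with
  | case1 j h hlt ih => have := ih (by omega); exact ⟨by omega, this.2⟩
  | case2 j h hlt => exact ⟨le_refl _, by omega⟩
  | case3 j h => exact ⟨le_refl _, hj⟩

lemma skipAhead_stop (r : List Int) (i : Int) (j : Nat)
    (h : skipAhead r i j < r.length) : i - 1 ≤ r[skipAhead r i j] := by
  fun_induction skipAhead r i j with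
  | case1 j h1 hlt ih => exact ih h
  | case2 j h1 hlt => omega
  | case3 j h1 => omega

lemma skipAhead_dropped (r : List Int) (i : Int) (j : Nat) :
    ∀ x ∈ r.drop j, x ∈ r.drop (skipAhead r i j) ∨ x < i - 1 := by
  fun_induction skipAhead r i j with
  | case1 j h1 hlt ih =>
    intro x hx
    rw [List.drop_eq_getElem_cons h1] at hx
    rcases List.mem_cons.mp hx with rfl | hx
    · right; exact hlt
    · exact ih x hx
  | case2 j h1 hlt => intro x hx; exact Or.inl hx
  | case3 j h1 => intro x hx; exact Or.inl hx

-- the joint loop invariant: processing the sorted lost list L, A's remaining-lost length and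
-- B's matched counter move in lockstep; S is A's reserve set, r the sorted reserve list, j B's
-- pointer; every element of S is either still reachable (in r.drop j) or too small for all of L
lemma main_inv (r : List Int) (hr : r.Pairwise (· < ·)) :
    ∀ (L S M : List Int) (j : Nat) (c : Int),
      L.Pairwise (· < ·) → S.Nodup → M.Nodup →
      (∀ x ∈ L, x ∈ M) → (∀ x ∈ L, x ∉ S) → (∀ x ∈ L, x ∉ r) →
      j ≤ r.length →
      (∀ x ∈ S, x ∈ r.drop j ∨ ∀ i ∈ L, x < i - 1) →
      (∀ x ∈ r.drop j, x ∈ S) →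
      ((L.foldl stepA (S, M)).2.length : Int) + (L.foldl (stepB r) (j, c)).2
        = (M.length : Int) + c := by
  intro L
  induction L with
  | nil => intro S M j c _ _ _ _ _ _ _ _ _; simp
  | cons i L ih =>
    intro S M j c hL hS hM hLM hLS hLr hj hH1 hH2
    obtain ⟨hiM, hLM'⟩ : i ∈ M ∧ ∀ x ∈ L, x ∈ M :=
      ⟨hLM i (List.mem_cons_self ..), fun x hx => hLM x (List.mem_cons_of_mem _ hx)⟩
    have hiL : ∀ i' ∈ L, i < i' := (List.pairwise_cons.mp hL).1
    have hL' : L.Pairwise (· < ·) := (List.pairwise_cons.mp hL).2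
    have hiS : i ∉ S := hLS i (List.mem_cons_self ..)
    have hir : i ∉ r := hLr i (List.mem_cons_self ..)
    set j2 := skipAhead r i j with hj2def
    have hsle := skipAhead_le r i j hj
    have hsub : ∀ x ∈ r.drop j2, x ∈ r.drop j := by
      have hdd : r.drop j2 = (r.drop j).drop (j2 - j) := by
        rw [List.drop_drop]; congr 1; omega
      rw [hdd]; exact fun x hx => List.drop_subset _ _ hx
    have hH2' : ∀ x ∈ r.drop j2, x ∈ S := fun x hx => hH2 x (hsub x hx)
    have hH1' : ∀ x ∈ S, x ∈ r.drop j2 ∨ (∀ i' ∈ (i :: L), x < i' - 1) := by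
      intro x hx
      rcases hH1 x hx with hxd | hsmall
      · rcases skipAhead_dropped r i j x hxd with h | h
        · exact Or.inl h
        · refine Or.inr ?_
          intro i' hi'
          rcases List.mem_cons.mp hi' with rfl | hi'
          · exact h
          · have := hiL i' hi'; omega
      · exact Or.inr hsmall
    -- a member of S within [i-1, i+1] forces position j2 to hold it (or something between)
    have hfind : ∀ v, v ∈ S → (i - 1 ≤ v) → v ≤ i + 1 →
        ∃ hlt : j2 < r.length, v = r[j2] ∨ (r[j2] < v ∧ r[j2] ∈ S ∧ i - 1 ≤ r[j2]) := by
      intro v hv hge hle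
      have hd : v ∈ r.drop j2 := by
        rcases hH1' v hv with h | h
        · exact h
        · have := h i (List.mem_cons_self ..); omega
      have hlt : j2 < r.length := by
        by_contra h
        rw [List.drop_eq_nil_of_le (by omega)] at hd
        exact absurd hd (List.not_mem_nil)
      refine ⟨hlt, ?_⟩
      have hcons : r.drop j2 = r[j2] :: r.drop (j2 + 1) := List.drop_eq_getElem_cons hlt
      have hstop : i - 1 ≤ r[j2] := skipAhead_stop r i j (hj2def ▸ hlt)
      rw [hcons] at hd
      rcases List.mem_cons.mp hd with rfl | hd2
      · exact Or.inl rfl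
      · have hpair : (r.drop j2).Pairwise (· < ·) := hr.sublist (List.drop_sublist _ _)
        rw [hcons] at hpair
        have := (List.pairwise_cons.mp hpair).1 v hd2
        have hmem : r[j2] ∈ S := hH2' r[j2] (by rw [hcons]; exact List.mem_cons_self ..)
        exact Or.inr ⟨this, hmem, hstop⟩
    rw [List.foldl_cons, List.foldl_cons]
    by_cases hc1 : (i - 1) ∈ S
    · -- A borrows i-1; B matches r[j2] = i-1
      obtain ⟨hlt, hv⟩ := hfind (i - 1) hc1 (by omega) (by omega)
      have heq : r[j2] = i - 1 := by
        rcases hv with h | ⟨h1, h2, h3⟩ <;> omega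
      have hA : stepA (S, M) i = (PySem.Set.discard S (i - 1), M.erase i) := by
        simp only [stepA]
        rw [if_pos (by exact (PySem.Set.contains_iff S (i-1)).mpr hc1)]
        rw [PySem.Set.remove?_of_mem hc1, PySem.List.remove?_eq_some_erase M i hiM]
        rfl
      have hB : stepB r (j, c) i = (j2 + 1, c + 1) := by
        simp only [stepB, ← hj2def]
        rw [dif_pos hlt, if_pos (by omega)]
      rw [hA, hB]
      have hcons : r.drop j2 = r[j2] :: r.drop (j2 + 1) := List.drop_eq_getElem_cons hlt
      have htail_gt : ∀ x ∈ r.drop (j2 + 1), r[j2] < x := by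
        have hpair : (r.drop j2).Pairwise (· < ·) := hr.sublist (List.drop_sublist _ _)
        rw [hcons] at hpair
        exact (List.pairwise_cons.mp hpair).1
      have := ih (PySem.Set.discard S (i - 1)) (M.erase i) (j2 + 1) (c + 1) hL'
        (PySem.Set.nodup_discard S (i - 1) hS) (hM.erase i)
        (fun x hx => (List.Nodup.mem_erase_iff hM).mpr ⟨by have := hiL x hx; omega, hLM' x hx⟩)
        (fun x hx hmem => hLS x (List.mem_cons_of_mem _ hx) ((PySem.Set.mem_discard S (i-1) x).mp hmem).1)
        (fun x hx => hLr x (List.mem_cons_of_mem _ hx))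
        (by omega)
        (by
          intro x hx
          obtain ⟨hxS, hxne⟩ := (PySem.Set.mem_discard S (i-1) x).mp hx
          rcases hH1' x hxS with hxd | hsmall
          · rw [hcons] at hxd
            rcases List.mem_cons.mp hxd with rfl | hxd2
            · omega
            · exact Or.inl hxd2
          · exact Or.inr (fun i' hi' => hsmall i' (List.mem_cons_of_mem _ hi')))
        (by
          intro x hx
          have hxj2 : x ∈ r.drop j2 := by rw [hcons]; exact List.mem_cons_of_mem _ hx
          refine (PySem.Set.mem_discard S (i-1) x).mpr ⟨hH2' x hxj2, ?_⟩
          have := htail_gt x hx; omega)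
      rw [this]
      have hlen := List.length_erase_of_mem hiM
      have hpos : 0 < M.length := List.length_pos_of_mem hiM
      omega
    · by_cases hc2 : (i + 1) ∈ S
      · -- A borrows i+1; B matches r[j2] = i+1
        obtain ⟨hlt, hv⟩ := hfind (i + 1) hc2 (by omega) (by omega)
        have heq : r[j2] = i + 1 := by
          rcases hv with h | ⟨h1, h2, h3⟩
          · omega
          · have hne1 : r[j2] ≠ i - 1 := fun h => hc1 (h ▸ h2)
            have hne2 : r[j2] ≠ i := fun h => hiS (h ▸ h2)
            omega
        have hA : stepA (S, M) i = (PySem.Set.discard S (i + 1), M.erase i) := by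
          simp only [stepA]
          rw [if_neg (by simp only [PySem.Set.contains_iff]; exact hc1)]
          rw [if_pos (by exact (PySem.Set.contains_iff S (i+1)).mpr hc2)]
          rw [PySem.Set.remove?_of_mem hc2, PySem.List.remove?_eq_some_erase M i hiM]
          rfl
        have hB : stepB r (j, c) i = (j2 + 1, c + 1) := by
          simp only [stepB, ← hj2def]
          rw [dif_pos hlt, if_pos (by omega)]
        rw [hA, hB]
        have hcons : r.drop j2 = r[j2] :: r.drop (j2 + 1) := List.drop_eq_getElem_cons hlt
        have htail_gt : ∀ x ∈ r.drop (j2 + 1), r[j2] < x := by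
          have hpair : (r.drop j2).Pairwise (· < ·) := hr.sublist (List.drop_sublist _ _)
          rw [hcons] at hpair
          exact (List.pairwise_cons.mp hpair).1
        have := ih (PySem.Set.discard S (i + 1)) (M.erase i) (j2 + 1) (c + 1) hL'
          (PySem.Set.nodup_discard S (i + 1) hS) (hM.erase i)
          (fun x hx => (List.Nodup.mem_erase_iff hM).mpr ⟨by have := hiL x hx; omega, hLM' x hx⟩)
          (fun x hx hmem => hLS x (List.mem_cons_of_mem _ hx) ((PySem.Set.mem_discard S (i+1) x).mp hmem).1)
          (fun x hx => hLr x (List.mem_cons_of_mem _ hx))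
          (by omega)
          (by
            intro x hx
            obtain ⟨hxS, hxne⟩ := (PySem.Set.mem_discard S (i+1) x).mp hx
            rcases hH1' x hxS with hxd | hsmall
            · rw [hcons] at hxd
              rcases List.mem_cons.mp hxd with rfl | hxd2
              · omega
              · exact Or.inl hxd2
            · exact Or.inr (fun i' hi' => hsmall i' (List.mem_cons_of_mem _ hi')))
          (by
            intro x hx
            have hxj2 : x ∈ r.drop j2 := by rw [hcons]; exact List.mem_cons_of_mem _ hx
            refine (PySem.Set.mem_discard S (i+1) x).mpr ⟨hH2' x hxj2, ?_⟩
            have := htail_gt x hx; omega)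
        rw [this]
        have hlen := List.length_erase_of_mem hiM
        have hpos : 0 < M.length := List.length_pos_of_mem hiM
        omega
      · -- no candidate reserve: A's state is unchanged and B does not match either
        have hA : stepA (S, M) i = (S, M) := by
          simp only [stepA]
          rw [if_neg (by simp only [PySem.Set.contains_iff]; exact hc1),
              if_neg (by simp only [PySem.Set.contains_iff]; exact hc2)]
        have hB : stepB r (j, c) i = (j2, c) := by
          simp only [stepB, ← hj2def]
          by_cases hlt : j2 < r.length
          · rw [dif_pos hlt]
            have hstop : i - 1 ≤ r[j2] := skipAhead_stop r i j (hj2def ▸ hlt)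
            have hrj2S : r[j2] ∈ S := hH2' r[j2] (by
              rw [List.drop_eq_getElem_cons hlt]; exact List.mem_cons_self ..)
            have hne1 : r[j2] ≠ i - 1 := fun h => hc1 (h ▸ hrj2S)
            have hne2 : r[j2] ≠ i := fun h => hiS (h ▸ hrj2S)
            have hne3 : r[j2] ≠ i + 1 := fun h => hc2 (h ▸ hrj2S)
            rw [if_neg (by omega)]
          · rw [dif_neg hlt]
        rw [hA, hB]
        exact ih S M j2 c hL' hS hM hLM'
          (fun x hx => hLS x (List.mem_cons_of_mem _ hx))
          (fun x hx => hLr x (List.mem_cons_of_mem _ hx))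
          (by omega)
          (by
            intro x hx
            rcases hH1' x hx with h | h
            · exact Or.inl h
            · exact Or.inr (fun i' hi' => h i' (List.mem_cons_of_mem _ hi')))
          hH2'

lemma sorted_nodup_pairwise_lt (xs : List Int) (h : xs.Nodup) :
    (PySem.List.sorted xs (fun x => x) false).Pairwise (· < ·) := by
  have hle : (PySem.List.sorted xs (fun x => x) false).Pairwise (fun a b => a ≤ b) :=
    PySem.List.sorted_pairwise xs (fun x => x)
  have hnd : (PySem.List.sorted xs (fun x => x) false).Nodup :=
    (PySem.List.sorted_perm xs (fun x => x) false).nodup_iff.mpr h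
  exact (hle.and hnd).imp (fun h => lt_of_le_of_ne h.1 h.2)

-- ===== VERDICT (by name: the statement is the Claim_ definition above) =====
theorem solution_spec : Claim_equal_solution := by
  intro n lost reserve _
  unfold Spec_solution
  simp only [solution, solution_alt]
  set N0 : List Int := PySem.Set.diff (PySem.Set.ofList lost) (PySem.Set.ofList reserve) with hN0
  set S0 : List Int := PySem.Set.diff (PySem.Set.ofList reserve) (PySem.Set.ofList lost) with hS0
  set L : List Int := PySem.List.sorted N0 (fun x => x) false with hLdef
  set r : List Int := PySem.List.sorted S0 (fun x => x) false with hrdef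
  have hNnd : N0.Nodup := PySem.Set.nodup_diff _ _ (PySem.Set.nodup_ofList lost)
  have hSnd : S0.Nodup := PySem.Set.nodup_diff _ _ (PySem.Set.nodup_ofList reserve)
  have hmemN : ∀ x, x ∈ L ↔ x ∈ N0 := fun x => PySem.List.mem_sorted N0 _ false x
  have hmemr : ∀ x, x ∈ r ↔ x ∈ S0 := fun x => PySem.List.mem_sorted S0 _ false x
  have hLnotS : ∀ x ∈ L, x ∉ S0 := by
    intro x hx hmem
    exact ((PySem.Set.mem_diff _ _ x).mp hmem).2
      ((PySem.Set.mem_diff _ _ x).mp ((hmemN x).mp hx)).1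
  have key := main_inv r (sorted_nodup_pairwise_lt S0 hSnd) L S0 N0 0 0
    (sorted_nodup_pairwise_lt N0 hNnd) hSnd hNnd
    (fun x hx => (hmemN x).mp hx) hLnotS
    (fun x hx hmem => hLnotS x hx ((hmemr x).mp hmem))
    (by omega)
    (by intro x hx; exact Or.inl (by simpa using (hmemr x).mpr hx))
    (by intro x hx; exact (hmemr x).mp (by simpa using hx))
  have hlenL : L.length = N0.length := PySem.List.length_sorted N0 _ false
  simp only [PySem.List.len_eq]
  omega
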